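-- pv_equiv track=rewrite | github.com/anayrat/powa-web | powa-remote/powa_remote/__init__.py | conf_are_equal
-- ===== SOURCE A (Python) =====
-- def conf_are_equal(conf1, conf2):
--     for k in conf1.keys():
--         if (k not in conf2):
--             return False
--         if (conf1[k] != conf2[k]):
--             return False
--
--     for k in conf2.keys():
--         if (k not in conf1):
--             return False
--         if (conf1[k] != conf2[k]):
--             return False
--
--     return True
-- ===== SOURCE B (Python) =====
-- def conf_are_equal(conf1, conf2):
--     # Canonicalize both dicts to key-sorted item lists and compare them wholesale:
--     # two dicts are equal as key->value maps iff their sorted item lists coincide.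
--     return sorted(conf1.items(), key=lambda kv: kv[0]) == sorted(conf2.items(), key=lambda kv: kv[0])
-- ===== Notes on version B (the rewrite author's own statement) =====
-- stated objective: alternative
-- what changed: Instead of A's two symmetric loops doing per-key membership tests and lookups in the other dict, B canonicalizes each dict into its item list sorted by key and compares the two canonical forms with a single list equality.
import Mathlib
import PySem

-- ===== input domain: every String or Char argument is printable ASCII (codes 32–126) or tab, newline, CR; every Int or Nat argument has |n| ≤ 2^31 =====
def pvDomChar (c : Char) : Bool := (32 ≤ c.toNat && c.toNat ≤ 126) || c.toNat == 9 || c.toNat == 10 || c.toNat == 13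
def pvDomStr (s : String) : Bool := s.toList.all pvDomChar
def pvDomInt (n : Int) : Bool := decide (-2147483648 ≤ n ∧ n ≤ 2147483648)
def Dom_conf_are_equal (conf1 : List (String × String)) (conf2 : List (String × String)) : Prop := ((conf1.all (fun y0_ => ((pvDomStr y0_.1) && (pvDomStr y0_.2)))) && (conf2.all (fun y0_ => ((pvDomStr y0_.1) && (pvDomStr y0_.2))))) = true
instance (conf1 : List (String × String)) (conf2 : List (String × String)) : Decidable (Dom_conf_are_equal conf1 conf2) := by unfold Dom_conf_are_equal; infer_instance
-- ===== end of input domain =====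

-- B replaces A's two per-key membership/lookup loops by canonicalization: sort each
-- dict's item list by key and compare the two canonical forms (alternative algorithm).

-- ===== PORT A =====
-- one of A's two loops: walk keys `ks`; for each k, membership test in `dmem`, then value comparison
def pvPassA (dmem d1 d2 : PySem.Dict String String) : List String → Bool
  | [] => true
  | k :: ks =>
    if !(dmem.contains k) then false
    else if d1.getD k "" ≠ d2.getD k "" then false
    else pvPassA dmem d1 d2 ks

def conf_are_equal (conf1 : List (String × String)) (conf2 : List (String × String)) : Bool :=
  let d1 := PySem.Dict.ofList conf1
  let d2 := PySem.Dict.ofList conf2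
  if pvPassA d2 d1 d2 d1.keys then pvPassA d1 d1 d2 d2.keys else false

-- ===== PORT B =====
-- sorted(conf.items(), key=lambda kv: kv[0]) == sorted(...) : compare key-sorted item lists
def conf_are_equal_alt (conf1 : List (String × String)) (conf2 : List (String × String)) : Bool :=
  let d1 := PySem.Dict.ofList conf1
  let d2 := PySem.Dict.ofList conf2
  PySem.List.sorted d1.items (fun kv => kv.1) == PySem.List.sorted d2.items (fun kv => kv.1)

-- ===== PRECONDITION & SPEC =====
def Spec_conf_are_equal (conf1 : List (String × String)) (conf2 : List (String × String)) (out : Bool) : Prop := out = conf_are_equal_alt conf1 conf2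
instance (conf1 : List (String × String)) (conf2 : List (String × String)) (out : Bool) : Decidable (Spec_conf_are_equal conf1 conf2 out) := by unfold Spec_conf_are_equal; infer_instance

-- ===== CLAIM (what is proved, stated in full; the proofs are below) =====
def Claim_equal_conf_are_equal : Prop := ∀ (conf1 : List (String × String)) (conf2 : List (String × String)), Dom_conf_are_equal conf1 conf2 → Spec_conf_are_equal conf1 conf2 (conf_are_equal conf1 conf2)

-- ===== LEMMAS AND PROOFS =====
theorem pvPassA_eq_all (dmem d1 d2 : PySem.Dict String String) (ks : List String) :
    pvPassA dmem d1 d2 ks = ks.all (fun k => dmem.contains k && (d1.getD k "" == d2.getD k "")) := by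
  induction ks with
  | nil => rfl
  | cons k ks ih =>
    simp only [pvPassA, List.all_cons, ih]
    by_cases hc : dmem.contains k <;> by_cases he : d1.getD k "" = d2.getD k "" <;>
      simp [hc, he]

-- the map-equality conditions A checks are exactly a permutation of item lists
theorem items_perm_iff (d1 d2 : PySem.Dict String String)
    (h1 : d1.keys.Nodup) (h2 : d2.keys.Nodup) :
    d1.items.Perm d2.items ↔
      ((∀ k ∈ d1.keys, d2.contains k = true ∧ d1.getD k "" = d2.getD k "") ∧
       (∀ k ∈ d2.keys, d1.contains k = true ∧ d1.getD k "" = d2.getD k "")) := by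
  constructor
  · intro hp
    have hmem := fun p => hp.mem_iff (a := p)
    constructor
    · intro k hk
      obtain ⟨p, hpmem, hpk⟩ := List.mem_map.mp hk
      obtain ⟨k', v⟩ := p
      subst hpk
      have hg1 : d1.get? k' = some v := PySem.Dict.get?_of_mem_items d1 hpmem h1
      have hg2 : d2.get? k' = some v :=
        PySem.Dict.get?_of_mem_items d2 ((hmem _).mp hpmem) h2
      refine ⟨?_, ?_⟩
      · rw [PySem.Dict.contains_eq_isSome_get?, hg2]; rfl
      · rw [PySem.Dict.getD_of_get?_eq_some _ "" hg1, PySem.Dict.getD_of_get?_eq_some _ "" hg2]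
    · intro k hk
      obtain ⟨p, hpmem, hpk⟩ := List.mem_map.mp hk
      obtain ⟨k', v⟩ := p
      subst hpk
      have hg2 : d2.get? k' = some v := PySem.Dict.get?_of_mem_items d2 hpmem h2
      have hg1 : d1.get? k' = some v :=
        PySem.Dict.get?_of_mem_items d1 ((hmem _).mpr hpmem) h1
      refine ⟨?_, ?_⟩
      · rw [PySem.Dict.contains_eq_isSome_get?, hg1]; rfl
      · rw [PySem.Dict.getD_of_get?_eq_some _ "" hg1, PySem.Dict.getD_of_get?_eq_some _ "" hg2]
  · rintro ⟨hA, hB⟩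
    have hsub12 : d1.items ⊆ d2.items := by
      rintro ⟨k, v⟩ hp
      have hk : k ∈ d1.keys := PySem.Dict.mem_keys_of_mem_items _ hp
      obtain ⟨hc2, hv⟩ := hA k hk
      have hg1 : d1.get? k = some v := PySem.Dict.get?_of_mem_items d1 hp h1
      rw [PySem.Dict.contains_eq_isSome_get?] at hc2
      obtain ⟨w, hg2⟩ := Option.isSome_iff_exists.mp hc2
      have : v = w := by
        rw [PySem.Dict.getD_of_get?_eq_some _ "" hg1, PySem.Dict.getD_of_get?_eq_some _ "" hg2] at hv
        exact hv
      subst this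
      exact PySem.Dict.mem_items_of_get?_eq_some d2 hg2
    have hsub21 : d2.items ⊆ d1.items := by
      rintro ⟨k, v⟩ hp
      have hk : k ∈ d2.keys := PySem.Dict.mem_keys_of_mem_items _ hp
      obtain ⟨hc1, hv⟩ := hB k hk
      have hg2 : d2.get? k = some v := PySem.Dict.get?_of_mem_items d2 hp h2
      rw [PySem.Dict.contains_eq_isSome_get?] at hc1
      obtain ⟨w, hg1⟩ := Option.isSome_iff_exists.mp hc1
      have : w = v := by
        rw [PySem.Dict.getD_of_get?_eq_some _ "" hg1, PySem.Dict.getD_of_get?_eq_some _ "" hg2] at hv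
        exact hv
      subst this
      exact PySem.Dict.mem_items_of_get?_eq_some d1 hg1
    have hn1 : d1.items.Nodup := List.Nodup.of_map _ h1
    have hn2 : d2.items.Nodup := List.Nodup.of_map _ h2
    exact List.Subperm.antisymm (hn1.subperm hsub12) (hn2.subperm hsub21)

-- key-sorted canonical forms of key-nodup lists coincide iff the lists are permutations
theorem sorted_key_eq_iff (l1 l2 : List (String × String))
    (h1 : (l1.map Prod.fst).Nodup) :
    PySem.List.sorted l1 (fun kv => kv.1) = PySem.List.sorted l2 (fun kv => kv.1) ↔
      l1.Perm l2 := by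
  constructor
  · intro heq
    exact (PySem.List.sorted_perm l1 _ false).symm.trans
      (heq ▸ PySem.List.sorted_perm l2 (fun kv => kv.1) false)
  · intro hperm
    have hs1 := PySem.List.sorted_perm l1 (fun kv => kv.1) false
    have hs2 := PySem.List.sorted_perm l2 (fun kv => kv.1) false
    have hsp : (PySem.List.sorted l1 (fun kv => kv.1)).Perm (PySem.List.sorted l2 (fun kv => kv.1)) :=
      hs1.trans (hperm.trans hs2.symm)
    have hlt : ∀ (l : List (String × String)), (l.map Prod.fst).Nodup →
        (PySem.List.sorted l (fun kv => kv.1)).Pairwise (fun a b => a.1 < b.1) := by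
      intro l hl
      have hle := PySem.List.sorted_pairwise l (fun kv => kv.1)
      have hnd : ((PySem.List.sorted l (fun kv => kv.1)).map Prod.fst).Nodup :=
        (((PySem.List.sorted_perm l (fun kv => kv.1) false).map Prod.fst).nodup_iff).mpr hl
      have hne := List.pairwise_map.mp hnd
      exact (hle.and hne).imp (fun h => lt_of_le_of_ne h.1 h.2)
    have hnd2 : (l2.map Prod.fst).Nodup := ((hperm.map Prod.fst).nodup_iff).mp h1
    exact List.Perm.eq_of_pairwise
      (fun a b _ _ hab hba => absurd hba (lt_asymm hab))
      (hlt l1 h1) (hlt l2 hnd2) hsp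

theorem dict_equal_eq (d1 d2 : PySem.Dict String String)
    (h1 : d1.keys.Nodup) (h2 : d2.keys.Nodup) :
    (if pvPassA d2 d1 d2 d1.keys then pvPassA d1 d1 d2 d2.keys else false) =
    (PySem.List.sorted d1.items (fun kv => kv.1) == PySem.List.sorted d2.items (fun kv => kv.1)) := by
  have hif : ∀ (c t : Bool), (if c then t else false) = (c && t) := by decide
  rw [Bool.eq_iff_iff, hif]
  simp only [pvPassA_eq_all, Bool.and_eq_true, List.all_eq_true, beq_iff_eq]
  rw [sorted_key_eq_iff d1.items d2.items h1, items_perm_iff d1 d2 h1 h2]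

-- ===== VERDICT (by name: the statement is the Claim_ definition above) =====
theorem conf_are_equal_spec : Claim_equal_conf_are_equal := by
  intro conf1 conf2 _
  show conf_are_equal conf1 conf2 = conf_are_equal_alt conf1 conf2
  unfold conf_are_equal conf_are_equal_alt
  exact dict_equal_eq _ _ (PySem.Dict.nodup_keys_ofList conf1) (PySem.Dict.nodup_keys_ofList conf2)
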